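-- pv_equiv track=rewrite | github.com/qianwei-conway/final_1211 | problem3.py | removeInvalidClosing
-- ===== SOURCE A (Python) =====
-- def removeInvalidClosing(str, opening, closing):
--     stack = []
--     balance = 0
--
--     for s in str:
--         if s == opening:
--             balance += 1
--         elif s == closing:
--             if balance <= 0:
--                 continue
--             else:
--                 balance -= 1
--         stack.append(s)
--
--     return ''.join(stack)
-- ===== SOURCE B (Python) =====
-- def removeInvalidClosing(str, opening, closing):
--     # Stack of output frames: frames[0] is the top-level buffer, each open
--     # bracket pushes a new frame.  A closer with only the base frame present
--     # is unmatched and dropped; otherwise the top frame (its bracket's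
--     # content) is sealed with the closer and merged into the frame below.
--     frames = [[]]
--     for ch in str:
--         if ch == opening:
--             frames.append([ch])
--         elif ch == closing:
--             if len(frames) > 1:
--                 top = frames.pop()
--                 top.append(ch)
--                 frames[-1].extend(top)
--             # else: unmatched closer, dropped
--         else:
--             frames[-1].append(ch)
--     # unmatched openers keep their frames; merge them bottom-to-top
--     return ''.join(''.join(f) for f in frames)
-- ===== Notes on version B (the rewrite author's own statement) =====
-- stated objective: alternative
-- what changed: Replaces A's balance counter plus flat output list by a stack of per-bracket output frames: each opener pushes a new frame, a matched closer merges the top frame into the one below, an unmatched closer (only the base frame present) is dropped, and remaining frames of unmatched openers are merged at the end.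
import Mathlib
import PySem

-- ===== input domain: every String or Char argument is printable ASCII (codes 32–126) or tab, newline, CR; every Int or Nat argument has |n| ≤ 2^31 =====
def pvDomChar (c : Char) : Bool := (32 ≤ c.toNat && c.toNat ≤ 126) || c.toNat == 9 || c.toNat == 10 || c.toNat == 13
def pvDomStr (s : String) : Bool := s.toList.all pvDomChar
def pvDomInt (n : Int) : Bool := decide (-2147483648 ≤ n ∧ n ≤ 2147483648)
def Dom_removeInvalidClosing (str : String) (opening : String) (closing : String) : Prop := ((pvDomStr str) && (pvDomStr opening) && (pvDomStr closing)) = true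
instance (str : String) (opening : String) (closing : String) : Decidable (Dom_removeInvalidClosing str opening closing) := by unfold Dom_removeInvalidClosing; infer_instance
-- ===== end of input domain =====

-- B replaces A's balance counter + flat output list by a stack of per-bracket output
-- frames (push on opener, merge top frame down on a matched closer, drop unmatched
-- closers, merge leftover frames at the end); same cost, alternative structure.

-- ===== PORT A =====
-- loop body of A (one character: update the output list and the balance counter)
def pvStepA (opening closing : String) (st : List Char × Int) (s : Char) : List Char × Int :=
  if String.mk [s] = opening then (st.1 ++ [s], st.2 + 1)
  else if String.mk [s] = closing then
    (if st.2 ≤ 0 then st else (st.1 ++ [s], st.2 - 1))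
  else (st.1 ++ [s], st.2)

def removeInvalidClosing (str : String) (opening : String) (closing : String) : String :=
  String.mk (str.toList.foldl (pvStepA opening closing) ([], 0)).1

-- ===== PORT B =====
-- loop body of B: the frame stack, top frame at the HEAD of the list
-- (Python keeps the top at the end; the final merge reverses accordingly)
def pvStepB (opening closing : String) (frames : List (List Char)) (s : Char) : List (List Char) :=
  if String.mk [s] = opening then [s] :: frames
  else if String.mk [s] = closing then
    match frames with
    | top :: below :: rest => (below ++ (top ++ [s])) :: rest
    | _ => frames
  else
    match frames with
    | top :: rest => (top ++ [s]) :: rest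
    | [] => []

def removeInvalidClosing_alt (str : String) (opening : String) (closing : String) : String :=
  String.mk ((str.toList.foldl (pvStepB opening closing) [[]]).reverse.flatten)

-- ===== PRECONDITION & SPEC =====
def Spec_removeInvalidClosing (str : String) (opening : String) (closing : String) (out : String) : Prop := out = removeInvalidClosing_alt str opening closing
instance (str : String) (opening : String) (closing : String) (out : String) : Decidable (Spec_removeInvalidClosing str opening closing out) := by unfold Spec_removeInvalidClosing; infer_instance

-- ===== CLAIM (what is proved, stated in full; the proofs are below) =====
def Claim_equal_removeInvalidClosing : Prop := ∀ (str : String) (opening : String) (closing : String), Dom_removeInvalidClosing str opening closing → Spec_removeInvalidClosing str opening closing (removeInvalidClosing str opening closing)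

-- ===== LEMMAS AND PROOFS =====

-- invariant: A's output list is the bottom-to-top concatenation of B's frames,
-- and A's balance is the number of open frames (stack length minus one)
lemma fold_invariant (o c : String) : ∀ (l : List Char) (frames : List (List Char)),
    frames ≠ [] →
    (l.foldl (pvStepA o c) (frames.reverse.flatten, (frames.length : Int) - 1)).1 =
      (l.foldl (pvStepB o c) frames).reverse.flatten := by
  intro l
  induction l with
  | nil => intro frames _; rfl
  | cons s cs ih =>
    intro frames hne
    match frames, hne with
    | top :: rest, _ =>
      rw [List.foldl_cons, List.foldl_cons]
      by_cases h1 : String.mk [s] = o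
      · -- opener: push a new frame
        simp only [pvStepA, pvStepB, if_pos h1]
        have e1 : (top :: rest).reverse.flatten ++ [s] =
            ([s] :: top :: rest).reverse.flatten := by simp
        have e2 : ((top :: rest).length : Int) - 1 + 1 =
            (([s] :: top :: rest).length : Int) - 1 := by simp
        rw [e1, e2]
        exact ih ([s] :: top :: rest) (by simp)
      · by_cases h2 : String.mk [s] = c
        · cases rest with
          | nil =>
            -- only the base frame: unmatched closer, dropped by both
            simp only [pvStepA, pvStepB, if_neg h1, if_pos h2]
            rw [if_pos (show (([top] : List (List Char)).length : Int) - 1 ≤ 0 by simp)]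
            exact ih [top] (by simp)
          | cons below rest' =>
            -- matched closer: A appends it; B merges the top frame down
            simp only [pvStepA, pvStepB, if_neg h1, if_pos h2]
            rw [if_neg (show ¬ (((top :: below :: rest' : List (List Char)).length : Int) - 1 ≤ 0)
              by simp)]
            have e1 : (top :: below :: rest').reverse.flatten ++ [s] =
                ((below ++ (top ++ [s])) :: rest').reverse.flatten := by simp
            have e2 : ((top :: below :: rest' : List (List Char)).length : Int) - 1 - 1 =
                (((below ++ (top ++ [s])) :: rest' : List (List Char)).length : Int) - 1 := by
              simp
            rw [e1, e2]
            exact ih ((below ++ (top ++ [s])) :: rest') (by simp)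
        · -- neutral character: append to the top frame
          simp only [pvStepA, pvStepB, if_neg h1, if_neg h2]
          have e1 : (top :: rest).reverse.flatten ++ [s] =
              ((top ++ [s]) :: rest).reverse.flatten := by simp
          have e2 : ((top :: rest).length : Int) - 1 =
              (((top ++ [s]) :: rest : List (List Char)).length : Int) - 1 := by simp
          rw [e1, e2]
          exact ih ((top ++ [s]) :: rest) (by simp)

-- ===== VERDICT (by name: the statement is the Claim_ definition above) =====
theorem removeInvalidClosing_spec : Claim_equal_removeInvalidClosing := by
  intro str opening closing _
  unfold Spec_removeInvalidClosing removeInvalidClosing removeInvalidClosing_alt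
  exact congrArg String.mk (by simpa using fold_invariant opening closing str.toList [[]] (by simp))
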